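-- pv_equiv track=rewrite | github.com/cabecrandall/Global_Hydrology_And_Climate_Data | AppEEARs_Automator.py | longest_numeric_substring
-- ===== SOURCE A (Python) =====
-- def longest_numeric_substring(input_string):
--     current_numeric = ""
--     longest_numeric = ""
--
--     for char in input_string:
--         if char.isnumeric():
--             current_numeric += char
--         else:
--             if len(current_numeric) > len(longest_numeric):
--                 longest_numeric = current_numeric
--             current_numeric = ""
--
--     # Check if the last numeric substring is the longest
--     if len(current_numeric) > len(longest_numeric):
--         longest_numeric = current_numeric
--
--     return longest_numeric
-- ===== SOURCE B (Python) =====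
-- from itertools import takewhile
--
-- def longest_numeric_substring(input_string):
--     # Brute force over all start positions: the maximal numeric run starting
--     # at each index; keep the first strictly-longest one.
--     best = ""
--     for i in range(len(input_string)):
--         run = "".join(takewhile(str.isnumeric, input_string[i:]))
--         if len(run) > len(best):
--             best = run
--     return best
-- ===== Notes on version B (the rewrite author's own statement) =====
-- stated objective: alternative
-- what changed: Replaces A's single-pass accumulate-and-reset state machine by a brute-force scan over all start positions: for each index take the maximal numeric run starting there (itertools.takewhile) and keep the first strictly-longest run.
import Mathlib
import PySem

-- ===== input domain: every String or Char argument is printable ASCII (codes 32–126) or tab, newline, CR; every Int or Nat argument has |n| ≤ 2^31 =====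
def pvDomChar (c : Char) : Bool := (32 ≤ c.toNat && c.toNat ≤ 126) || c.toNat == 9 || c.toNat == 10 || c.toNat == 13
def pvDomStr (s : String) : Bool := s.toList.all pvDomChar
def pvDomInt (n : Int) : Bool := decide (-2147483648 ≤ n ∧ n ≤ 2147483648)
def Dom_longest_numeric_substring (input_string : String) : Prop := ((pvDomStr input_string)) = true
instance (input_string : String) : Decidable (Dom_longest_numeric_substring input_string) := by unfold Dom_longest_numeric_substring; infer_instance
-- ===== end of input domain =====

-- B replaces A's single-pass accumulate-and-reset state machine by a brute-force scan over
-- all start positions, keeping the first strictly-longest maximal numeric run (objective: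
-- alternative; B is O(n^2) where A is O(n)).
-- char.isnumeric() is ported as PySem.Chars.isdigit: on the printable-ASCII domain they agree ('0'-'9').

-- ===== PORT A =====
-- loop state: (current_numeric, longest_numeric) as char lists
def pvAStep (st : List Char × List Char) (c : Char) : List Char × List Char :=
  if PySem.Chars.isdigit c then (st.1 ++ [c], st.2)
  else ([], if st.1.length > st.2.length then st.1 else st.2)

def longest_numeric_substring (input_string : String) : String :=
  let st := input_string.toList.foldl pvAStep ([], [])
  -- final flush: check if the last numeric substring is the longest
  if st.1.length > st.2.length then String.mk st.1 else String.mk st.2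

-- ===== PORT B =====
-- for i in range(len(s)): run = takewhile(isnumeric, s[i:]); keep if strictly longer.
-- Iteration over the start positions i is the structural recursion over the suffixes s[i:].
def pvBLoop : List Char → List Char → List Char
  | [], best => best
  | c :: cs, best =>
      let run := List.takeWhile PySem.Chars.isdigit (c :: cs)
      pvBLoop cs (if run.length > best.length then run else best)

def longest_numeric_substring_alt (input_string : String) : String :=
  String.mk (pvBLoop input_string.toList [])

-- ===== PRECONDITION & SPEC =====
def Spec_longest_numeric_substring (input_string : String) (out : String) : Prop := out = longest_numeric_substring_alt input_string
instance (input_string : String) (out : String) : Decidable (Spec_longest_numeric_substring input_string out) := by unfold Spec_longest_numeric_substring; infer_instance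

-- ===== CLAIM (what is proved, stated in full; the proofs are below) =====
def Claim_equal_longest_numeric_substring : Prop := ∀ (input_string : String), Dom_longest_numeric_substring input_string → Spec_longest_numeric_substring input_string (longest_numeric_substring input_string)

-- ===== LEMMAS AND PROOFS =====

-- A's final flush as a function of the loop state
def pvFin (st : List Char × List Char) : List Char :=
  if st.1.length > st.2.length then st.1 else st.2

-- proof-only intermediate: the maximal runs of equal isdigit-key (built back-to-front)
def pvRuns : List Char → List (List Char)
  | [] => []
  | c :: cs =>
    match pvRuns cs with
    | (d :: ds) :: rest =>
        if PySem.Chars.isdigit c == PySem.Chars.isdigit d then (c :: d :: ds) :: rest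
        else [c] :: (d :: ds) :: rest
    | rs => [c] :: rs

def pvRunIsNum : List Char → Bool
  | [] => false
  | d :: _ => PySem.Chars.isdigit d

def pvBStep (best r : List Char) : List Char :=
  if pvRunIsNum r then (if r.length > best.length then r else best) else best

-- prepend a (possibly empty) pending digit run to a run list, merging with a digit head run
def pvConsRun (cur : List Char) (rs : List (List Char)) : List (List Char) :=
  match cur with
  | [] => rs
  | _ =>
    match rs with
    | (d :: ds) :: rest =>
        if PySem.Chars.isdigit d then (cur ++ d :: ds) :: rest else cur :: rs
    | rs => cur :: rs

lemma pvBStep_digit_run (cur best : List Char) (h : cur.all PySem.Chars.isdigit) :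
    pvBStep best cur = pvFin (cur, best) := by
  cases cur with
  | nil => simp [pvBStep, pvRunIsNum, pvFin]
  | cons d ds =>
    simp only [List.all_cons, Bool.and_eq_true] at h
    simp [pvBStep, pvRunIsNum, h.1, pvFin]

lemma pvBStep_nil (b : List Char) : pvBStep b [] = b := by
  simp [pvBStep, pvRunIsNum]

lemma pvFin_nil (b : List Char) : pvFin ([], b) = b := by
  simp [pvFin]

-- A's loop from state (cur, best) = selection over cur prepended to the runs of the rest
lemma pvMain (cs : List Char) : ∀ cur best : List Char, cur.all PySem.Chars.isdigit →
    pvFin (cs.foldl pvAStep (cur, best)) = (pvConsRun cur (pvRuns cs)).foldl pvBStep best := by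
  induction cs with
  | nil =>
    intro cur best h
    cases cur with
    | nil => simp [pvConsRun, pvRuns, pvFin]
    | cons d ds =>
      simp only [List.foldl_nil, pvConsRun, List.foldl_cons, List.foldl_nil]
      exact (pvBStep_digit_run _ best h).symm
  | cons c cs ih =>
    intro cur best h
    by_cases hc : PySem.Chars.isdigit c = true
    · have step : List.foldl pvAStep (cur, best) (c :: cs)
          = List.foldl pvAStep (cur ++ [c], best) cs := by
        simp [pvAStep, hc]
      rw [step, ih (cur ++ [c]) best (by simp_all)]
      show (pvConsRun (cur ++ [c]) (pvRuns cs)).foldl pvBStep best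
          = (pvConsRun cur (pvRuns (c :: cs))).foldl pvBStep best
      congr 1
      cases cur with
      | nil =>
        simp only [List.nil_append, pvConsRun]
        cases hr : pvRuns cs with
        | nil => simp [pvRuns, hr]
        | cons r rest =>
          cases r with
          | nil => simp [pvRuns, hr, pvConsRun]
          | cons d ds =>
            by_cases hd : PySem.Chars.isdigit d = true
            · simp [pvRuns, hr, hd, hc, pvConsRun]
            · simp [pvRuns, hr, hd, hc, pvConsRun]
      | cons a as =>
        cases hr : pvRuns cs with
        | nil => simp [pvRuns, hr, pvConsRun, hc]
        | cons r rest =>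
          cases r with
          | nil => simp [pvRuns, hr, pvConsRun, hc]
          | cons d ds =>
            by_cases hd : PySem.Chars.isdigit d = true
            · simp [pvRuns, hr, hd, hc, pvConsRun]
            · simp [pvRuns, hr, hd, hc, pvConsRun]
    · have hc' : PySem.Chars.isdigit c = false := by simpa using hc
      have step : List.foldl pvAStep (cur, best) (c :: cs)
          = List.foldl pvAStep ([], pvFin (cur, best)) cs := by
        simp [pvAStep, hc', pvFin]
      rw [step, ih [] (pvFin (cur, best)) (by simp)]
      simp only [pvConsRun]
      have hcur := pvBStep_digit_run cur best h
      have hskip : ∀ ds b, pvBStep b (c :: ds) = b := by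
        intro ds b; simp [pvBStep, pvRunIsNum, hc']
      cases hr : pvRuns cs with
      | nil =>
        cases cur with
        | nil => simp [pvRuns, hr, pvConsRun, hskip, pvFin_nil]
        | cons a as => simp [pvRuns, hr, pvConsRun, hc', hskip, ← hcur]
      | cons r rest =>
        cases r with
        | nil =>
          cases cur with
          | nil => simp [pvRuns, hr, pvConsRun, hc', hskip, pvBStep, pvRunIsNum, pvFin_nil]
          | cons a as => simp [pvRuns, hr, pvConsRun, hc', hskip, pvBStep, pvRunIsNum, ← hcur]
        | cons d ds =>
          by_cases hd : PySem.Chars.isdigit d = true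
          · cases cur with
            | nil => simp [pvRuns, hr, hd, hc', pvConsRun, hskip, pvBStep_nil, pvFin_nil]
            | cons a as => simp [pvRuns, hr, hd, hc', pvConsRun, hskip, ← hcur]
          · have hskip' : ∀ b, pvBStep b (d :: ds) = b := by
              intro b; simp [pvBStep, pvRunIsNum, hd]
            cases cur with
            | nil => simp [pvRuns, hr, hd, hc', pvConsRun, hskip, hskip', pvBStep_nil, pvFin_nil]
            | cons a as => simp [pvRuns, hr, hd, hc', pvConsRun, hskip, hskip', ← hcur]

-- pvRuns unfolded one step (equation lemma, used to rewrite under the match)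
lemma pvRuns_cons (c : Char) (cs : List Char) :
    pvRuns (c :: cs)
      = match pvRuns cs with
        | (d :: ds) :: rest =>
            if PySem.Chars.isdigit c == PySem.Chars.isdigit d then (c :: d :: ds) :: rest
            else [c] :: (d :: ds) :: rest
        | rs => [c] :: rs := rfl

-- the head of pvRuns of a nonempty list starts with its head char
lemma pvRuns_head (x : Char) (xs : List Char) :
    ∃ t rest, pvRuns (x :: xs) = (x :: t) :: rest := by
  cases hr : pvRuns xs with
  | nil => exact ⟨[], [], by simp [pvRuns_cons, hr]⟩
  | cons r rs =>
    cases r with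
    | nil => exact ⟨[], [] :: rs, by simp [pvRuns_cons, hr]⟩
    | cons d ds =>
      by_cases hd : PySem.Chars.isdigit x = PySem.Chars.isdigit d
      · exact ⟨d :: ds, rs, by simp [pvRuns_cons, hr, hd]⟩
      · exact ⟨[], (d :: ds) :: rs, by simp [pvRuns_cons, hr, hd]⟩

-- a leading digit peels off the whole leading digit run
lemma pvRuns_cons_digit (cs : List Char) : ∀ d : Char, PySem.Chars.isdigit d = true →
    pvRuns (d :: cs)
      = (d :: cs.takeWhile PySem.Chars.isdigit) :: pvRuns (cs.dropWhile PySem.Chars.isdigit) := by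
  induction cs with
  | nil => intro d hd; simp [pvRuns]
  | cons e es ih =>
    intro d hd
    by_cases he : PySem.Chars.isdigit e = true
    · have h2 := ih e he
      rw [pvRuns_cons d (e :: es), h2]
      simp [hd, he, List.takeWhile_cons, List.dropWhile_cons]
    · have he' : PySem.Chars.isdigit e = false := by simpa using he
      obtain ⟨t, rest, ht⟩ := pvRuns_head e es
      rw [pvRuns_cons d (e :: es), ht]
      simp [hd, he', List.takeWhile_cons, List.dropWhile_cons, ← ht]

-- a leading non-digit char does not change the selection
lemma pvFold_cons_nondigit (c : Char) (cs : List Char) (best : List Char)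
    (hc : PySem.Chars.isdigit c = false) :
    (pvRuns (c :: cs)).foldl pvBStep best = (pvRuns cs).foldl pvBStep best := by
  have hskip : ∀ ds b, pvBStep b (c :: ds) = b := by
    intro ds b; simp [pvBStep, pvRunIsNum, hc]
  cases hr : pvRuns cs with
  | nil => simp [pvRuns, hr, hskip]
  | cons r rest =>
    cases r with
    | nil => simp [pvRuns, hr, hskip, pvBStep_nil]
    | cons d ds =>
      by_cases hd : PySem.Chars.isdigit d = true
      · simp [pvRuns, hr, hd, hc, hskip]
      · have hskip' : ∀ b, pvBStep b (d :: ds) = b := by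
          intro b; simp [pvBStep, pvRunIsNum, hd]
        simp [pvRuns, hr, hd, hc, hskip, hskip']

-- B's brute-force suffix scan equals the selection over the maximal runs
lemma pvBLoop_eq (cs : List Char) : ∀ best : List Char,
    pvBLoop cs best = (pvRuns cs).foldl pvBStep best := by
  induction cs with
  | nil => intro best; simp [pvBLoop, pvRuns]
  | cons c cs ih =>
    intro best
    by_cases hc : PySem.Chars.isdigit c = true
    · have hrun : List.takeWhile PySem.Chars.isdigit (c :: cs)
          = c :: cs.takeWhile PySem.Chars.isdigit := by simp [hc]
      have lhs : pvBLoop (c :: cs) best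
          = pvBLoop cs (if (c :: cs.takeWhile PySem.Chars.isdigit).length > best.length
                        then c :: cs.takeWhile PySem.Chars.isdigit else best) := by
        simp only [pvBLoop, hrun]
      rw [lhs, ih, pvRuns_cons_digit cs c hc, List.foldl_cons]
      have hstep : pvBStep best (c :: cs.takeWhile PySem.Chars.isdigit)
          = (if (c :: cs.takeWhile PySem.Chars.isdigit).length > best.length
             then c :: cs.takeWhile PySem.Chars.isdigit else best) := by
        simp [pvBStep, pvRunIsNum, hc]
      rw [hstep]
      generalize hB : (if (c :: cs.takeWhile PySem.Chars.isdigit).length > best.length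
                       then c :: cs.takeWhile PySem.Chars.isdigit else best) = B
      have hlen : (cs.takeWhile PySem.Chars.isdigit).length < B.length := by
        rw [← hB]; split
        · simp
        · next h => simp only [List.length_cons] at h; omega
      cases cs with
      | nil => simp
      | cons e es =>
        by_cases he : PySem.Chars.isdigit e = true
        · rw [pvRuns_cons_digit es e he, List.foldl_cons]
          have h3 : ¬ (e :: es.takeWhile PySem.Chars.isdigit).length > B.length := by
            simp only [List.takeWhile_cons, he, if_pos] at hlen
            simp only [List.length_cons] at hlen ⊢
            omega
          have hstep2 : pvBStep B (e :: es.takeWhile PySem.Chars.isdigit) = B := by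
            simp only [List.length_cons] at h3
            simp [pvBStep, pvRunIsNum, he]
            intro hle; omega
          rw [hstep2]
          simp [List.dropWhile_cons, he]
        · have he' : PySem.Chars.isdigit e = false := by simpa using he
          simp [List.dropWhile_cons, he']
    · have hc' : PySem.Chars.isdigit c = false := by simpa using hc
      have hrun : List.takeWhile PySem.Chars.isdigit (c :: cs) = [] := by
        simp [List.takeWhile_cons, hc']
      have lhs : pvBLoop (c :: cs) best = pvBLoop cs best := by
        simp only [pvBLoop, hrun]; simp
      rw [lhs, ih best, pvFold_cons_nondigit c cs best hc']

-- ===== VERDICT (by name: the statement is the Claim_ definition above) =====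
theorem longest_numeric_substring_spec : Claim_equal_longest_numeric_substring := by
  intro s _
  show longest_numeric_substring s = longest_numeric_substring_alt s
  unfold longest_numeric_substring longest_numeric_substring_alt
  have h1 := pvMain s.toList [] [] (by simp)
  simp only [pvConsRun] at h1
  rw [show (if (s.toList.foldl pvAStep ([], [])).1.length > (s.toList.foldl pvAStep ([], [])).2.length
        then String.mk (s.toList.foldl pvAStep ([], [])).1
        else String.mk (s.toList.foldl pvAStep ([], [])).2)
      = String.mk (pvFin (s.toList.foldl pvAStep ([], []))) from by unfold pvFin; split <;> rfl]
  rw [h1, ← pvBLoop_eq]
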